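-- pv_equiv track=rewrite | github.com/TheAuditorTool/project_anarchy | performance/bottlenecks.py | unnecessary_list_operations
-- ===== SOURCE A (Python) =====
-- from typing import List, Any
--
-- def bubble_sort(arr: List[int]) -> List[int]:
--     """Inefficient bubble sort - O(n²)."""
--     n = len(arr)
--     arr = arr.copy()
--
--     for i in range(n):
--         for j in range(0, n - i - 1):
--             if arr[j] > arr[j + 1]:
--                 # Swap
--                 arr[j], arr[j + 1] = arr[j + 1], arr[j]
--
--     return arr
--
-- def unnecessary_list_operations(data: List[int]) -> List[int]:
--     """Multiple inefficient list operations."""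
--     result = []
--
--     # Inefficient: using append in loop instead of list comprehension
--     for item in data:
--         result.append(item * 2)
--
--     # Inefficient: repeatedly checking membership in list (O(n) each)
--     filtered = []
--     for item in result:
--         if item not in filtered:  # O(n) operation
--             filtered.append(item)
--
--     # Inefficient: multiple passes when one would suffice
--     squared = []
--     for item in filtered:
--         squared.append(item ** 2)
--
--     sorted_result = []
--     for item in squared:
--         sorted_result.append(item)
--
--     # Inefficient sort (should use built-in)
--     return bubble_sort(sorted_result)
-- ===== SOURCE B (Python) =====
-- def unnecessary_list_operations(data):
--     doubled = sorted(x * 2 for x in data)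
--     kept = []
--     for v in doubled:
--         if not kept or kept[-1] != v:
--             kept.append(v)
--     return sorted(v * v for v in kept)
-- ===== Notes on version B (the rewrite author's own statement) =====
-- stated objective: faster
-- what changed: B sorts the doubled values first and dedups in one linear adjacency pass before squaring and a final sort, replacing A's O(n^2) membership-scan dedup and O(n^2) bubble sort with two O(n log n) sorts.
import Mathlib
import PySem

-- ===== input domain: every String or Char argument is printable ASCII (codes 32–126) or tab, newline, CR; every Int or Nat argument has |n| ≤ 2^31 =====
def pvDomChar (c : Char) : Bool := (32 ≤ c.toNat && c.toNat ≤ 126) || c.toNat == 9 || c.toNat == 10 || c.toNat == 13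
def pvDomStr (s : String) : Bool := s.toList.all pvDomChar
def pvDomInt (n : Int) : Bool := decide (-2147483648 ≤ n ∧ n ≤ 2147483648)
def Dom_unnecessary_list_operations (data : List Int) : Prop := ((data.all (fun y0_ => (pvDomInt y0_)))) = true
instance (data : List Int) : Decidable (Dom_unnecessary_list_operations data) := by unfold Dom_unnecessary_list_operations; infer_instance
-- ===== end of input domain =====

-- B replaces A's O(n^2) membership-scan dedup and O(n^2) bubble sort by sort-first + linear adjacency dedup + final sort (faster, measured).


-- ===== PORT A =====
-- one inner-loop body of bubble_sort: compare arr[j], arr[j+1] and swap (indices are always in range when called by bubble_sort)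
def pvBubbleStep (a : List Int) (j : Int) : List Int :=
  if PySem.List.pyGetD a (j + 1) 0 < PySem.List.pyGetD a j 0 then
    (a.set j.toNat (PySem.List.pyGetD a (j + 1) 0)).set (j + 1).toNat (PySem.List.pyGetD a j 0)
  else a

-- n = len(arr); arr.copy() is immaterial for the return value
def bubble_sort (arr : List Int) : List Int :=
  (PySem.List.pyRange 0 (arr.length : Int) 1).foldl
    (fun a i => (PySem.List.pyRange 0 ((arr.length : Int) - i - 1) 1).foldl pvBubbleStep a) arr

-- the four loops of A in sequence: result (doubling), filtered (membership dedup),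
-- squared, sorted_result (plain copy), then bubble_sort
def unnecessary_list_operations (data : List Int) : List Int :=
  bubble_sort
    ((((data.foldl (fun acc item => acc ++ [item * 2]) []).foldl
          (fun acc item => if acc.contains item then acc else acc ++ [item]) []).foldl
        (fun acc item => acc ++ [item ^ 2]) []).foldl
      (fun acc item => acc ++ [item]) [])

-- ===== PORT B =====
-- doubled = sorted(x * 2 for x in data); kept = the adjacency-dedup loop
-- ('if not kept or kept[-1] != v: kept.append(v)' ≡ append unless the last kept element equals v);
-- result = sorted(v * v for v in kept)
def unnecessary_list_operations_alt (data : List Int) : List Int :=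
  PySem.List.sorted
    (((PySem.List.sorted (data.map (fun x => x * 2)) (fun x => x) false).foldl
        (fun acc v => if acc.getLast? = some v then acc else acc ++ [v]) []).map (fun v => v * v))
    (fun x => x) false

-- ===== PRECONDITION & SPEC =====
def Spec_unnecessary_list_operations (data : List Int) (out : List Int) : Prop := out = unnecessary_list_operations_alt data
instance (data : List Int) (out : List Int) : Decidable (Spec_unnecessary_list_operations data out) := by unfold Spec_unnecessary_list_operations; infer_instance

-- ===== CLAIM (what is proved, stated in full; the proofs are below) =====
def Claim_equal_unnecessary_list_operations : Prop := ∀ (data : List Int), Dom_unnecessary_list_operations data → Spec_unnecessary_list_operations data (unnecessary_list_operations data)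

-- ===== LEMMAS AND PROOFS =====

-- Nat-indexed form of pvBubbleStep
def stepN (a : List Int) (j : Nat) : List Int :=
  if a.getD (j + 1) 0 < a.getD j 0 then
    (a.set j (a.getD (j + 1) 0)).set (j + 1) (a.getD j 0)
  else a

-- structural single bubble pass limited to m comparisons
def bpass : Nat → List Int → List Int
  | 0, l => l
  | _ + 1, [] => []
  | _ + 1, [a] => [a]
  | m + 1, a :: b :: t => if b < a then b :: bpass m (a :: t) else a :: bpass m (b :: t)

-- outer loop of bubble sort, pass sizes counting down j-1, j-2, …, 0
def gB : Nat → List Int → List Int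
  | 0, l => l
  | j + 1, l => gB j (bpass j l)

lemma pvBubbleStep_natCast (a : List Int) (j : Nat) : pvBubbleStep a (j : Int) = stepN a j := by
  have h1 : ((j : Int) + 1) = ((j + 1 : Nat) : Int) := by push_cast; ring
  unfold pvBubbleStep stepN
  rw [h1]
  simp only [PySem.List.pyGetD_natCast, Int.toNat_natCast]

lemma stepN_cons (h : Int) (t : List Int) (j : Nat) : stepN (h :: t) (j + 1) = h :: stepN t j := by
  simp only [stepN, List.getD_cons_succ, List.set]
  split_ifs with hc
  · rfl
  · rfl

lemma foldl_stepN_map_succ (js : List Nat) (h : Int) (t : List Int) :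
    (js.map Nat.succ).foldl stepN (h :: t) = h :: js.foldl stepN t := by
  induction js generalizing t with
  | nil => rfl
  | cons j js ih => simp [List.foldl_cons, stepN_cons, ih]

lemma innerN_eq_bpass : ∀ (m : Nat) (l : List Int), m < l.length →
    (List.range m).foldl stepN l = bpass m l := by
  intro m
  induction m with
  | zero => intro l _; rfl
  | succ m ih =>
    intro l hl
    match l with
    | [] => simp at hl
    | [a] => simp at hl
    | a :: b :: t =>
      have hr : List.range (m + 1) = 0 :: (List.range m).map Nat.succ := by
        exact List.range_succ_eq_map (n := m)
      have hstep0 : stepN (a :: b :: t) 0 = if b < a then b :: a :: t else a :: b :: t := by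
        simp [stepN, List.set]
      rw [hr, List.foldl_cons, hstep0]
      have hm : m < t.length + 1 := by simp at hl; omega
      split_ifs with hba
      · rw [foldl_stepN_map_succ, ih (a :: t) (by simpa using hm)]
        simp [bpass, hba]
      · rw [foldl_stepN_map_succ, ih (b :: t) (by simpa using hm)]
        simp [bpass, hba]

lemma bpass_perm : ∀ (m : Nat) (l : List Int), (bpass m l).Perm l := by
  intro m
  induction m with
  | zero => intro l; simp [bpass]
  | succ m ih =>
    intro l
    match l with
    | [] => simp [bpass]
    | [a] => simp [bpass]
    | a :: b :: t =>
      simp only [bpass]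
      split_ifs with hba
      · exact ((ih (a :: t)).cons b).trans (List.Perm.swap a b t)
      · exact (ih (b :: t)).cons a

lemma bpass_length (m : Nat) (l : List Int) : (bpass m l).length = l.length :=
  (bpass_perm m l).length_eq

lemma bpass_append : ∀ (m : Nat) (u v : List Int), u.length = m + 1 →
    bpass m (u ++ v) = bpass m u ++ v := by
  intro m
  induction m with
  | zero => intro u v _; rfl
  | succ m ih =>
    intro u v hu
    match u with
    | [] => simp at hu
    | [a] => simp at hu
    | a :: b :: t =>
      simp only [List.cons_append, bpass]
      split_ifs with hba
      · rw [← List.cons_append, ih (a :: t) v (by simp at hu ⊢; omega), List.cons_append]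
      · rw [← List.cons_append, ih (b :: t) v (by simp at hu ⊢; omega), List.cons_append]

lemma bpass_max : ∀ (m : Nat) (l : List Int), l.length = m + 1 →
    ∃ l' x, bpass m l = l' ++ [x] ∧ ∀ y ∈ l, y ≤ x := by
  intro m
  induction m with
  | zero =>
    intro l hl
    match l with
    | [a] => exact ⟨[], a, rfl, by simp⟩
  | succ m ih =>
    intro l hl
    match l with
    | [] => simp at hl
    | [a] => simp at hl
    | a :: b :: t =>
      have ht : (t.length) = m := by simp at hl; omega
      simp only [bpass]
      split_ifs with hba
      · obtain ⟨l', x, heq, hx⟩ := ih (a :: t) (by simp [ht])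
        refine ⟨b :: l', x, by simp [heq], ?_⟩
        intro z hz
        rcases List.mem_cons.mp hz with rfl | hz
        · exact hx z (by simp)
        · rcases List.mem_cons.mp hz with rfl | hz
          · exact le_of_lt (lt_of_lt_of_le hba (hx a (by simp)))
          · exact hx z (by simp [hz])
      · obtain ⟨l', x, heq, hx⟩ := ih (b :: t) (by simp [ht])
        refine ⟨a :: l', x, by simp [heq], ?_⟩
        intro z hz
        rcases List.mem_cons.mp hz with rfl | hz
        · exact le_trans (not_lt.mp hba) (hx b (by simp))
        · exact hx z hz

lemma gB_correct : ∀ (j : Nat) (l : List Int), j ≤ l.length →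
    (∀ x ∈ l.take j, ∀ y ∈ l.drop j, x ≤ y) → (l.drop j).Pairwise (· ≤ ·) →
    (gB j l).Perm l ∧ (gB j l).Pairwise (· ≤ ·) := by
  intro j
  induction j with
  | zero => intro l _ _ hp; exact ⟨List.Perm.refl l, by simpa using hp⟩
  | succ j ih =>
    intro l hlen hsep hp
    set u := l.take (j + 1) with hu_def
    set v := l.drop (j + 1) with hv_def
    have hu : u.length = j + 1 := by simp [hu_def]; omega
    have hl : l = u ++ v := (List.take_append_drop (j + 1) l).symm
    obtain ⟨l', x, heq, hx⟩ := bpass_max j u hu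
    have hbp : bpass j l = l' ++ x :: v := by
      rw [hl, bpass_append j u v hu, heq]; simp
    have hperm_u : (bpass j u).Perm u := bpass_perm j u
    have hperm : (bpass j l).Perm l := by
      rw [hl, bpass_append j u v hu]; exact hperm_u.append_right v
    have hl' : l'.length = j := by
      have := bpass_length j u
      rw [heq] at this; simp [hu] at this; omega
    -- membership of l' ++ [x] in u
    have hmem_u : ∀ y, y ∈ l' ++ [x] → y ∈ u := by
      intro y hy; rw [← heq] at hy; exact hperm_u.mem_iff.mp hy
    have hsep' : ∀ p ∈ u, ∀ q ∈ v, p ≤ q := hsep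
    have htake : (l' ++ x :: v).take j = l' := by
      rw [List.take_append_of_le_length (by omega), List.take_of_length_le (by omega)]
    have hdrop : (l' ++ x :: v).drop j = x :: v := by
      rw [List.drop_append_of_le_length (by omega), List.drop_of_length_le (by omega)]
      simp
    have hlen' : j ≤ (l' ++ x :: v).length := by simp; omega
    have hsep2 : ∀ p ∈ (l' ++ x :: v).take j, ∀ q ∈ (l' ++ x :: v).drop j, p ≤ q := by
      rw [htake, hdrop]
      intro p hp' q hq'
      have hpu : p ∈ u := hmem_u p (by simp [hp'])
      rcases List.mem_cons.mp hq' with rfl | hq'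
      · exact hx p hpu
      · exact hsep' p hpu q hq'
    have hp2 : ((l' ++ x :: v).drop j).Pairwise (· ≤ ·) := by
      rw [hdrop]
      refine List.Pairwise.cons ?_ hp
      intro b hb
      exact hsep' x (hmem_u x (by simp)) b hb
    obtain ⟨hP, hS⟩ := ih (l' ++ x :: v) hlen' hsep2 hp2
    rw [show gB (j + 1) l = gB j (bpass j l) from rfl, hbp]
    exact ⟨hP.trans (hbp ▸ hperm), hS⟩

lemma outer_fold_eq_gB : ∀ (j n : Nat) (l : List Int), l.length = n → j ≤ n →
    (List.range' (n - j) j).foldl (fun a k => (List.range (n - k - 1)).foldl stepN a) l = gB j l := by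
  intro j
  induction j with
  | zero => intro n l _ _; rfl
  | succ j ih =>
    intro n l hn hj
    have h1 : n - (j + 1) = n - j - 1 := by omega
    have h2 : n - (j + 1) + 1 = n - j := by omega
    have hr : List.range' (n - (j + 1)) (j + 1) = (n - j - 1) :: List.range' (n - j) j := by
      rw [List.range'_succ, h2, h1]
    rw [hr, List.foldl_cons]
    have hb : n - (n - j - 1) - 1 = j := by omega
    have hjl : j < l.length := by rw [hn]; omega
    rw [hb, innerN_eq_bpass j l hjl]
    have : (bpass j l).length = n := by rw [bpass_length, hn]
    rw [ih n (bpass j l) this (by omega)]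
    rfl

lemma bubble_eq_gB (arr : List Int) : bubble_sort arr = gB arr.length arr := by
  unfold bubble_sort
  rw [PySem.List.pyRange_zero_nat arr.length, List.foldl_map]

  have hcong : ∀ (a : List Int), ∀ k ∈ List.range arr.length,
      (PySem.List.pyRange 0 ((arr.length : Int) - (k : Int) - 1) 1).foldl pvBubbleStep a
        = (List.range (arr.length - k - 1)).foldl stepN a := by
    intro a k hk
    have hk' : k < arr.length := List.mem_range.mp hk
    have hcast : ((arr.length : Int) - (k : Int) - 1) = ((arr.length - k - 1 : Nat) : Int) := by
      push_cast [Nat.cast_sub (by omega : 1 ≤ arr.length - k), Nat.cast_sub (le_of_lt hk')]; ring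
    rw [hcast, PySem.List.pyRange_zero_nat, List.foldl_map]
    exact PySem.List.foldl_congr_mem _ _ _ _ (fun acc x _ => pvBubbleStep_natCast acc x)
  rw [PySem.List.foldl_congr_mem _ _ _ _ hcong]
  have := outer_fold_eq_gB arr.length arr.length arr rfl (le_refl _)
  simpa [List.range_eq_range'] using this

lemma bubble_sort_perm (z : List Int) : (bubble_sort z).Perm z := by
  rw [bubble_eq_gB]
  exact (gB_correct z.length z (le_refl _) (by simp) (by simp)).1

lemma bubble_sort_pairwise (z : List Int) : (bubble_sort z).Pairwise (· ≤ ·) := by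
  rw [bubble_eq_gB]
  exact (gB_correct z.length z (le_refl _) (by simp) (by simp)).2

-- ===== adjacency dedup (B side) =====
def adjF : Int → List Int → List Int
  | _, [] => []
  | last, v :: t => if v = last then adjF last t else v :: adjF v t

lemma fold_adj : ∀ (l acc : List Int) (x : Int), acc.getLast? = some x →
    l.foldl (fun acc v => if acc.getLast? = some v then acc else acc ++ [v]) acc = acc ++ adjF x l := by
  intro l
  induction l with
  | nil => intro acc x _; simp [adjF]
  | cons v t ih =>
    intro acc x hx
    simp only [List.foldl_cons, adjF]
    by_cases hvx : v = x
    · subst hvx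
      rw [if_pos hx, if_pos rfl, ih acc v hx]
    · rw [if_neg (by rw [hx]; simp [Ne.symm hvx]), if_neg hvx,
        ih (acc ++ [v]) v (by simp), List.append_assoc]
      rfl

lemma adjF_subset : ∀ (l : List Int) (x y : Int), y ∈ adjF x l → y ∈ l := by
  intro l
  induction l with
  | nil => intro x y h; simp [adjF] at h
  | cons v t ih =>
    intro x y h
    simp only [adjF] at h
    split_ifs at h with hv
    · exact List.mem_cons_of_mem _ (ih x y h)
    · rcases List.mem_cons.mp h with rfl | h
      · simp
      · exact List.mem_cons_of_mem _ (ih v y h)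

lemma adjF_mem_of : ∀ (l : List Int) (x y : Int), y ∈ l → y ∈ x :: adjF x l := by
  intro l
  induction l with
  | nil => intro x y h; simp at h
  | cons v t ih =>
    intro x y h
    simp only [adjF]
    rcases List.mem_cons.mp h with rfl | h
    · split_ifs with hv
      · subst hv; simp
      · simp
    · split_ifs with hv
      · exact ih x y h
      · rcases List.mem_cons.mp (ih v y h) with rfl | h'
        · simp
        · simp [h']

lemma adjF_pairwise_lt : ∀ (l : List Int) (x : Int), (x :: l).Pairwise (· ≤ ·) →
    (x :: adjF x l).Pairwise (· < ·) := by
  intro l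
  induction l with
  | nil => intro x _; simp [adjF]
  | cons v t ih =>
    intro x hp
    have hxv : x ≤ v := (List.pairwise_cons.mp hp).1 v (by simp)
    have hvt : (v :: t).Pairwise (· ≤ ·) := (List.pairwise_cons.mp hp).2
    simp only [adjF]
    split_ifs with hv
    · subst hv
      exact ih v hvt
    · have hlt : x < v := lt_of_le_of_ne hxv (Ne.symm hv)
      have htail := ih v hvt
      refine List.pairwise_cons.mpr ⟨?_, htail⟩
      intro b hb
      rcases List.mem_cons.mp hb with rfl | hb
      · exact hlt
      · have hbt : b ∈ t := adjF_subset t v b hb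
        have : v ≤ b := (List.pairwise_cons.mp hvt).1 b hbt
        exact lt_of_lt_of_le hlt this

-- ===== the pipeline =====
lemma alt_key (data : List Int) :
    ∃ K : List Int, unnecessary_list_operations_alt data
        = PySem.List.sorted (K.map (fun v => v * v)) (fun x => x) false
      ∧ K.Nodup ∧ (∀ y, y ∈ K ↔ y ∈ data.map (fun x => x * 2)) := by
  unfold unnecessary_list_operations_alt
  cases hdd : PySem.List.sorted (data.map (fun x => x * 2)) (fun x => x) false with
  | nil =>
    refine ⟨[], by rfl, List.nodup_nil, ?_⟩
    have hS : data.map (fun x => x * 2) = [] :=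
      (PySem.List.sorted_eq_nil_iff _ _ _).mp hdd
    simp [hS]
  | cons x l =>
    have hpw : (x :: l).Pairwise (· ≤ ·) := by
      have h := PySem.List.sorted_pairwise (data.map (fun x => x * 2)) (fun x => x)
      rw [hdd] at h
      simpa using h
    have hmemS : ∀ y : Int, y ∈ x :: l ↔ y ∈ data.map (fun x => x * 2) := by
      intro y
      rw [← hdd]
      exact PySem.List.mem_sorted _ _ _ y
    have hfold : (x :: l).foldl
        (fun acc v => if acc.getLast? = some v then acc else acc ++ [v]) [] = x :: adjF x l := by
      rw [List.foldl_cons, if_neg (by simp)]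
      simpa using fold_adj l [x] x (by simp)
    refine ⟨x :: adjF x l, by rw [hfold], (adjF_pairwise_lt l x hpw).imp ne_of_lt, ?_⟩
    intro y
    rw [← hmemS y]
    constructor
    · intro hy
      rcases List.mem_cons.mp hy with rfl | hy
      · simp
      · exact List.mem_cons_of_mem _ (adjF_subset l x y hy)
    · intro hy
      rcases List.mem_cons.mp hy with rfl | hy
      · simp
      · exact adjF_mem_of l x y hy

-- ===== VERDICT (by name: the statement is the Claim_ definition above) =====
theorem unnecessary_list_operations_spec : Claim_equal_unnecessary_list_operations := by
  intro data _
  unfold Spec_unnecessary_list_operations unnecessary_list_operations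
  obtain ⟨K, hBalt, hKnodup, hKmem⟩ := alt_key data
  rw [hBalt]
  rw [PySem.List.foldl_append_singleton_eq_map (fun item => item * 2) data []]
  simp only [List.nil_append]
  rw [show (List.foldl (fun acc item => if acc.contains item then acc else acc ++ [item]) []
        (data.map (fun x => x * 2))) = PySem.Set.ofList (data.map (fun x => x * 2)) from
      (PySem.Set.ofList_eq_foldl _).symm]
  rw [PySem.List.foldl_append_singleton_eq_map (fun item => item ^ 2)
        (PySem.Set.ofList (data.map (fun x => x * 2))) []]
  simp only [List.nil_append]
  rw [PySem.List.foldl_append_singleton_eq_self]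
  simp only [List.nil_append]
  have hFK : (PySem.Set.ofList (data.map (fun x => x * 2)) : List Int).Perm K := by
    refine (List.perm_ext_iff_of_nodup (PySem.Set.nodup_ofList _) hKnodup).mpr ?_
    intro y
    rw [PySem.Set.mem_ofList, hKmem]
  have hmapsq : (PySem.Set.ofList (data.map (fun x => x * 2)) : List Int).map (fun item => item ^ 2)
      = (PySem.Set.ofList (data.map (fun x => x * 2)) : List Int).map (fun v => v * v) := by
    apply List.map_congr_left; intro a _; ring
  have hperm : (bubble_sort ((PySem.Set.ofList (data.map (fun x => x * 2)) : List Int).map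
      (fun item => item ^ 2))).Perm (K.map (fun v => v * v)) := by
    refine (bubble_sort_perm _).trans ?_
    rw [hmapsq]; exact hFK.map _
  exact (PySem.List.sorted_id_eq_of_perm_of_pairwise _ _ hperm (bubble_sort_pairwise _)).symm
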